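-- pv_equiv track=rewrite | github.com/tauvaa/advent_of_code | 2021/day12/question2.py | check_multi_cave
-- ===== SOURCE A (Python) =====
-- def check_multi_cave(path):
--     lower_caves = list(filter(lambda x: not check_upper(x), path))
--     all_chars = {}
--     for s in lower_caves:
--         if s in all_chars:
--             all_chars[s] += 1
--         else:
--             all_chars[s] = 1
--     if max(all_chars.values()) > 2:
--         return True
--     if len(list(filter(lambda x: x > 1, all_chars.values()))) > 1:
--         return True
--     return False
--
-- def check_upper(instring):
--     return instring.upper() == instring
-- ===== SOURCE B (Python) =====
-- def check_multi_cave(path):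
--     lower_caves = [s for s in path if s.upper() != s]
--     return len(lower_caves) - len(set(lower_caves)) >= 2
--
-- def check_upper(instring):
--     return instring.upper() == instring
-- ===== Notes on version B (the rewrite author's own statement) =====
-- stated objective: simpler
-- what changed: Replaces the dict-of-counts plus two threshold tests (max>2, or two counts>1) by the equivalent arithmetic fact that both amount to at least two repeat visits: len(lower_caves) - len(set(lower_caves)) >= 2; Pre_ excludes exactly the inputs with no lowercase cave, on which A's max() raises ValueError (B returns False there).
import Mathlib
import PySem

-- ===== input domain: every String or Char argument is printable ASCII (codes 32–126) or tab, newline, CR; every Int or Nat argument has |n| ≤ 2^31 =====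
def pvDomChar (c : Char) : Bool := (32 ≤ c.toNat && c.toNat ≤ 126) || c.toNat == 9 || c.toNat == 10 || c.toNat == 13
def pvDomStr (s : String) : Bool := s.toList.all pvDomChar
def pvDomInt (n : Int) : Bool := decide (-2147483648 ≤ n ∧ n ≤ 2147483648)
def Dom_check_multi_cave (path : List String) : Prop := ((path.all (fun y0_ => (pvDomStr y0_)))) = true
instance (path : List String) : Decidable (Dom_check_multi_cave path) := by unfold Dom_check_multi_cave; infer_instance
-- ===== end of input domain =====

-- B replaces the dict-of-counts and its two threshold tests by the arithmetic fact that they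
-- amount to "at least two repeat visits": len(lower) - len(set(lower)) >= 2 (simpler, one pass).

-- ===== PORT A =====
def check_upper (instring : String) : Bool := PySem.Str.upper instring == instring

def check_multi_cave (path : List String) : Bool :=
  let lower_caves := path.filter (fun x => !(check_upper x))
  let all_chars := lower_caves.foldl
    (fun d s => if d.contains s then d.insert s (d.getD s 0 + 1) else d.insert s (1 : Int))
    PySem.Dict.empty
  match PySem.List.max? all_chars.values (fun v => v) with
  | none => false   -- Python raises ValueError here (max of empty); excluded by Pre_
  | some m =>
    if m > 2 then true
    else if ((all_chars.values.filter (fun v : Int => v > 1)).length : Int) > 1 then true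
    else false

-- ===== PORT B =====
def check_multi_cave_alt (path : List String) : Bool :=
  let lower_caves := path.filter (fun s => !(PySem.Str.upper s == s))
  decide (((lower_caves.length : Int) - ((PySem.Set.ofList lower_caves).length : Int)) ≥ 2)

-- ===== PRECONDITION & SPEC =====
-- Pre_ excludes exactly the inputs with no lowercase cave, on which A's max() raises ValueError.
def Pre_check_multi_cave (path : List String) : Prop :=
  ∃ s ∈ path, PySem.Str.upper s ≠ s
instance (path : List String) : Decidable (Pre_check_multi_cave path) := by
  unfold Pre_check_multi_cave; infer_instance

def pvWitness_check_multi_cave : List String := ["start", "a", "a", "b", "b"]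

def Spec_check_multi_cave (path : List String) (out : Bool) : Prop := out = check_multi_cave_alt path
instance (path : List String) (out : Bool) : Decidable (Spec_check_multi_cave path out) := by unfold Spec_check_multi_cave; infer_instance

-- ===== CLAIM (what is proved, stated in full; the proofs are below) =====
def Claim_equal_check_multi_cave : Prop := ∀ (path : List String), Dom_check_multi_cave path → Pre_check_multi_cave path → Spec_check_multi_cave path (check_multi_cave path)

-- ===== LEMMAS AND PROOFS =====

-- A's counting loop is Counter (the else-branch inserts 1 = getD + 1 on a fresh key).
lemma fold_eq_counter (l : List String) :
    l.foldl (fun d s => if d.contains s then d.insert s (d.getD s 0 + 1) else d.insert s (1 : Int))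
      PySem.Dict.empty = PySem.Dict.counter l := by
  rw [← PySem.Dict.foldl_insert_getD_add_one_eq_counter]
  congr 1
  funext d s
  by_cases h : d.contains s
  · simp [h]
  · have h' : d.contains s = false := by simpa using h
    simp [h', PySem.Dict.getD_of_not_contains _ _ h']

-- joint arithmetic invariant over the list of per-cave counts (all ≥ 1):
-- "some count > 2 or at least two counts > 1" ⟺ "sum − length ≥ 2".
lemma counts_invariant (vals : List Int) (h1 : ∀ v ∈ vals, 1 ≤ v) :
    (0 ≤ vals.sum - vals.length) ∧
    ((∃ v ∈ vals, 1 < v) ↔ 1 ≤ vals.sum - vals.length) ∧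
    (((∃ v ∈ vals, 2 < v) ∨ 2 ≤ vals.countP (fun v => decide (1 < v))) ↔
       2 ≤ vals.sum - vals.length) := by
  induction vals with
  | nil => simp
  | cons v t ih =>
    have hv : 1 ≤ v := h1 v (List.mem_cons_self)
    obtain ⟨ih0, ih1, ih2⟩ := ih (fun x hx => h1 x (List.mem_cons_of_mem _ hx))
    have hcp : (0 < t.countP (fun v => decide (1 < v))) ↔ ∃ x ∈ t, 1 < x := by
      rw [List.countP_pos_iff]; simp
    constructor
    · simp only [List.sum_cons, List.length_cons]; push_cast; omega
    constructor
    · simp only [List.mem_cons, List.sum_cons, List.length_cons]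
      push_cast
      constructor
      · rintro ⟨x, (rfl | hx), hlt⟩
        · omega
        · have := ih1.mp ⟨x, hx, hlt⟩; omega
      · intro h
        by_cases hvb : 1 < v
        · exact ⟨v, Or.inl rfl, hvb⟩
        · have : 1 ≤ t.sum - t.length := by omega
          obtain ⟨x, hx, hlt⟩ := ih1.mpr this
          exact ⟨x, Or.inr hx, hlt⟩
    · simp only [List.mem_cons, List.sum_cons, List.length_cons, List.countP_cons]
      push_cast
      by_cases hvb : 1 < v
      · simp only [hvb, decide_true, if_true]
        by_cases hv3 : 2 < v
        · constructor
          · intro _; omega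
          · intro _; exact Or.inl ⟨v, Or.inl rfl, hv3⟩
        · -- v = 2
          have hv2 : v = 2 := by omega
          constructor
          · rintro (⟨x, (rfl | hx), hlt⟩ | hc)
            · omega
            · have := ih1.mp ⟨x, hx, by omega⟩; omega
            · have hpos : 0 < t.countP (fun v => decide (1 < v)) := by omega
              have := ih1.mp (hcp.mp hpos); omega
          · intro h
            have : 1 ≤ t.sum - t.length := by omega
            obtain ⟨x, hx, hlt⟩ := ih1.mpr this
            by_cases hx3 : 2 < x
            · exact Or.inl ⟨x, Or.inr hx, hx3⟩
            · have : 0 < t.countP (fun v => decide (1 < v)) := hcp.mpr ⟨x, hx, hlt⟩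
              exact Or.inr (by omega)
      · have hv1 : v = 1 := by omega
        simp only [hvb, decide_false, Bool.false_eq_true, if_false]
        constructor
        · rintro (⟨x, (rfl | hx), hlt⟩ | hc)
          · omega
          · have := ih2.mp (Or.inl ⟨x, hx, hlt⟩); omega
          · have := ih2.mp (Or.inr (by omega)); omega
        · intro h
          have := ih2.mpr (by omega)
          rcases this with ⟨x, hx, hlt⟩ | hc
          · exact Or.inl ⟨x, Or.inr hx, hlt⟩
          · exact Or.inr (by omega)

-- sum of per-key counts over the distinct keys is the length of the list
lemma sum_counts_eq_length (l : List String) :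
    ((PySem.Set.ofList l).map (fun k => (l.count k : Int))).sum = (l.length : Int) := by
  have hperm : (PySem.Set.ofList l).Perm l.dedup := by
    apply List.perm_of_nodup_nodup_toFinset_eq
    · exact PySem.Set.nodup_ofList l
    · exact l.nodup_dedup
    · ext x
      simp [PySem.Set.mem_ofList, List.mem_dedup]
  have hs : ((PySem.Set.ofList l).map (fun k => (l.count k : Int))).sum
      = ((l.dedup).map (fun k => (l.count k : Int))).sum :=
    (hperm.map _).sum_eq
  rw [hs]
  have : ((l.dedup).map (fun k => (l.count k : Int))).sum
      = (((l.dedup).map (fun k => l.count k)).sum : Int) := by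
    rw [Nat.cast_list_sum, List.map_map]
    rfl
  rw [this, List.sum_map_count_dedup_eq_length]

-- ===== VERDICT (by name: the statement is the Claim_ definition above) =====
theorem check_multi_cave_spec : Claim_equal_check_multi_cave := by
  intro path _ hpre
  unfold Spec_check_multi_cave check_multi_cave check_multi_cave_alt
  simp only [check_upper, fold_eq_counter]
  set lc := path.filter (fun x => !(PySem.Str.upper x == x)) with hlc
  have hlcne : lc ≠ [] := by
    obtain ⟨s, hs, hne⟩ := hpre
    intro h
    have : s ∈ lc := by
      rw [hlc, List.mem_filter]
      exact ⟨hs, by simp [hne]⟩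
    simp [h] at this
  have hvals : (PySem.Dict.counter lc).values
      = (PySem.Set.ofList lc).map (fun k => (lc.count k : Int)) := by
    show ((PySem.Dict.counter lc).items).map (·.2) = _
    rw [PySem.Dict.items_counter, List.map_map]
    rfl
  rw [hvals]
  set vals := (PySem.Set.ofList lc).map (fun k => (lc.count k : Int)) with hvd
  have h1 : ∀ v ∈ vals, 1 ≤ v := by
    intro v hv
    rw [hvd, List.mem_map] at hv
    obtain ⟨k, hk, rfl⟩ := hv
    have : k ∈ lc := (PySem.Set.mem_ofList _ _).mp hk
    have := List.count_pos_iff.mpr this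
    omega
  have hvne : vals ≠ [] := by
    rw [hvd]
    simp only [ne_eq, List.map_eq_nil_iff]
    intro h
    have := (PySem.Set.mem_ofList lc (lc.head hlcne)).mpr (List.head_mem hlcne)
    simp [h] at this
  have hsum : vals.sum = (lc.length : Int) := sum_counts_eq_length lc
  have hlen : (vals.length : Int) = ((PySem.Set.ofList lc).length : Int) := by
    rw [hvd, List.length_map]
  obtain ⟨m, hm⟩ : ∃ m, PySem.List.max? vals (fun v => v) = some m := by
    cases h : PySem.List.max? vals (fun v => v) with
    | none => exact absurd ((PySem.List.max?_eq_none_iff _ _).mp h) hvne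
    | some m => exact ⟨m, rfl⟩
  rw [hm]
  have hmmem : m ∈ vals := PySem.List.max?_mem hm
  have hmmax : ∀ y ∈ vals, y ≤ m := fun y hy => PySem.List.max?_isMax hm y hy
  obtain ⟨_, _, hiff⟩ := counts_invariant vals h1
  have hfilt : ((vals.filter (fun v : Int => v > 1)).length : Int)
      = (vals.countP (fun v => decide (1 < v)) : Int) := by
    rw [← List.countP_eq_length_filter]
  by_cases hm2 : m > 2
  · simp only [hm2, if_true]
    have : 2 ≤ vals.sum - vals.length := hiff.mp (Or.inl ⟨m, hmmem, hm2⟩)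
    rw [hsum, hlen] at this
    simp [ge_iff_le]
    omega
  · simp only [hm2, if_false]
    by_cases hc : ((vals.filter (fun v : Int => v > 1)).length : Int) > 1
    · simp only [hc, if_true]
      have hc2 : 2 ≤ vals.countP (fun v => decide (1 < v)) := by
        rw [hfilt] at hc; omega
      have : 2 ≤ vals.sum - vals.length := hiff.mp (Or.inr hc2)
      rw [hsum, hlen] at this
      simp [ge_iff_le]
      omega
    · simp only [hc, if_false]
      have hno : ¬ (2 ≤ vals.sum - vals.length) := by
        intro h
        rcases hiff.mpr h with ⟨v, hv, hv2⟩ | h2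
        · exact hm2 (lt_of_lt_of_le hv2 (hmmax v hv))
        · omega
      rw [hsum, hlen] at hno
      simp [ge_iff_le]
      omega
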